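-- pv_equiv track=rewrite | github.com/LyPay-Electronics-Group/LyPayAPI | scripts/censor.py | censor
-- ===== SOURCE A (Python) =====
-- def censor(field: str) -> bool:
--     """
--     Проверяет, есть ли в строке символы, которые потенциально могут вызвать непредвиденное поведение ядра:
--     '<', '>', '&' (не в составе специальных последовательностей "&amp;", "&lt;", "&gt;"
--
--     :param field: поле для строки
--     :return: True, если строка прошла проверку, False -- в обратном случае
--     """
--
--     for index in range(len(field)):
--         char = field[index]
--         if char == '<' or char == '>':
--             return False
--         if char == '&' and field[index:index+3] not in ('&lt;', '&gt;') and field[index:index+4] != '&amp;':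
--             return False
--     return True
-- ===== SOURCE B (Python) =====
-- def censor(field: str) -> bool:
--     return not (set(field) & {'<', '>', '&'})
-- ===== Notes on version B (the rewrite author's own statement) =====
-- stated objective: faster
-- what changed: A's slice comparisons against the escape literals are dead logic (the slices are one character shorter than the literals they are compared to), so B drops the positional index loop with slice look-aheads and instead builds the set of distinct characters once and returns whether it is disjoint from the three forbidden characters.
import Mathlib
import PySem

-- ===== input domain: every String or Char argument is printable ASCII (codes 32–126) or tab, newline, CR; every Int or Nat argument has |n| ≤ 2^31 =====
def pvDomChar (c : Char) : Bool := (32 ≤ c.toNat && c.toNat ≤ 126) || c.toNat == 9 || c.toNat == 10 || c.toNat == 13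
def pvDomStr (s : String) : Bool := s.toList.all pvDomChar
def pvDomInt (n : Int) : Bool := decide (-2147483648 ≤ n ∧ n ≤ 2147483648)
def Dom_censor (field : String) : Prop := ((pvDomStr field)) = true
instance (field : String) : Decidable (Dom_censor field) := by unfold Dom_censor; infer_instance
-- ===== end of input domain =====

-- B replaces A's index loop with slice look-aheads (which are dead: the slices are
-- shorter than the escape literals) by a one-pass distinct-character set tested for
-- disjointness against {'<','>','&'}; return value only, no side effects.

-- ===== PORT A =====
-- the loop body of A: early return False = stop with false, else continue with the rest of the indices
def censorLoopA (cs : List Char) (idxs : List Int) : Bool :=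
  match idxs with
  | [] => true
  | i :: rest =>
    let char := PySem.List.pyGetD cs i ' '
    if char = '<' ∨ char = '>' then false
    else if char = '&' ∧
        ¬ (PySem.List.slice cs (some i) (some (i + 3)) = "&lt;".toList ∨
           PySem.List.slice cs (some i) (some (i + 3)) = "&gt;".toList) ∧
        PySem.List.slice cs (some i) (some (i + 4)) ≠ "&amp;".toList then false
    else censorLoopA cs rest

def censor (field : String) : Bool :=
  censorLoopA field.toList (PySem.List.pyRange 0 (PySem.Str.len field) 1)

-- ===== PORT B =====
def censor_alt (field : String) : Bool :=
  (PySem.Set.inter (PySem.Set.ofList field.toList) (PySem.Set.ofList ['<', '>', '&'])).isEmpty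

-- ===== PRECONDITION & SPEC =====
def Spec_censor (field : String) (out : Bool) : Prop := out = censor_alt field
instance (field : String) (out : Bool) : Decidable (Spec_censor field out) := by unfold Spec_censor; infer_instance

-- ===== CLAIM (what is proved, stated in full; the proofs are below) =====
def Claim_equal_censor : Prop := ∀ (field : String), Dom_censor field → Spec_censor field (censor field)

-- ===== LEMMAS AND PROOFS =====

def goodChar (c : Char) : Bool := !(c = '<' || c = '>' || c = '&')

-- a slice of length ≤ 3 is never a 4-character escape literal, so A's '&' branch always fires
lemma slice3_ne (cs : List Char) (i : Int) (hi : 0 ≤ i) (l : List Char) (hl : l.length = 4) :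
    PySem.List.slice cs (some i) (some (i + 3)) ≠ l := by
  intro h
  have := congrArg List.length h
  rw [PySem.List.slice_toNat cs hi (by omega), hl] at this
  have h3 : (i + 3).toNat - i.toNat = 3 := by omega
  rw [h3] at this
  have := List.length_take_le 3 (cs.drop i.toNat)
  omega

lemma slice4_ne (cs : List Char) (i : Int) (hi : 0 ≤ i) (l : List Char) (hl : l.length = 5) :
    PySem.List.slice cs (some i) (some (i + 4)) ≠ l := by
  intro h
  have := congrArg List.length h
  rw [PySem.List.slice_toNat cs hi (by omega), hl] at this
  have h4 : (i + 4).toNat - i.toNat = 4 := by omega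
  rw [h4] at this
  have := List.length_take_le 4 (cs.drop i.toNat)
  omega

-- A's loop over range(a, len) checks exactly the suffix cs.drop a
lemma loopA_eq (cs : List Char) (a : Int) (ha : 0 ≤ a) :
    censorLoopA cs (PySem.List.pyRange a (cs.length : Int) 1) = (cs.drop a.toNat).all goodChar := by
  by_cases h : a < (cs.length : Int)
  · rw [PySem.List.pyRange_one_cons h]
    have hget : PySem.List.pyGetD cs a ' ' = cs[a.toNat]'(by omega) := by
      rw [PySem.List.pyGetD_of_nonneg] <;> first | omega | simp [(by omega : a.toNat < cs.length)]
    have hdrop : cs.drop a.toNat = cs[a.toNat]'(by omega) :: cs.drop (a + 1).toNat := by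
      rw [(by omega : (a + 1).toNat = a.toNat + 1), ← List.drop_drop,
          List.drop_eq_getElem_cons (by omega)]
      simp
    rw [censorLoopA, hdrop]
    simp only [hget, List.all_cons]
    set c := cs[a.toNat]'(by omega) with hc
    by_cases h1 : c = '<' ∨ c = '>'
    · simp [h1, goodChar]
      rcases h1 with h1 | h1 <;> simp [h1]
    · by_cases h2 : c = '&'
      · have hs3 := slice3_ne cs a ha "&lt;".toList (by decide)
        have hs3' := slice3_ne cs a ha "&gt;".toList (by decide)
        have hs4 := slice4_ne cs a ha "&amp;".toList (by decide)
        simp [h2, goodChar]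
        rintro ((hcon | hcon) | hcon)
        · exact absurd hcon hs3
        · exact absurd hcon hs3'
        · exact absurd hcon hs4
      · have ihyp := loopA_eq cs (a + 1) (by omega)
        simp only [goodChar]
        push Not at h1
        simp [h1.1, h1.2, h2, ihyp]
  · rw [PySem.List.pyRange_one_eq_nil (by omega)]
    rw [List.drop_of_length_le (by omega)]
    rfl
termination_by ((cs.length : Int) - a).toNat
decreasing_by omega

-- B's set intersection is empty iff no character of cs is one of '<','>','&'
lemma interB_eq (cs : List Char) :
    ((PySem.Set.inter (PySem.Set.ofList cs) (PySem.Set.ofList ['<', '>', '&'])).isEmpty) =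
      cs.all goodChar := by
  rcases h : ((PySem.Set.inter (PySem.Set.ofList cs) (PySem.Set.ofList ['<', '>', '&'])).isEmpty) with _ | _
  · rw [List.isEmpty_eq_false_iff_exists_mem] at h
    obtain ⟨x, hx⟩ := h
    rw [PySem.Set.mem_inter] at hx
    rw [PySem.Set.mem_ofList, PySem.Set.mem_ofList] at hx
    symm
    rw [List.all_eq_false]
    refine ⟨x, hx.1, ?_⟩
    have hx2 := hx.2
    simp only [List.mem_cons, List.not_mem_nil, or_false] at hx2
    rcases hx2 with h | h | h <;> simp [goodChar, h]
  · rw [List.isEmpty_iff] at h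
    symm
    rw [List.all_eq_true]
    intro x hx
    by_contra hbad
    have hxin : x ∈ PySem.Set.inter (PySem.Set.ofList cs) (PySem.Set.ofList ['<', '>', '&']) := by
      rw [PySem.Set.mem_inter, PySem.Set.mem_ofList, PySem.Set.mem_ofList]
      refine ⟨hx, ?_⟩
      simp only [goodChar, Bool.not_eq_true', Bool.or_eq_false_iff, decide_eq_false_iff_not] at hbad
      simp only [List.mem_cons, List.not_mem_nil, or_false]
      by_cases h1 : x = '<' <;> by_cases h2 : x = '>' <;> by_cases h3 : x = '&' <;> simp_all
    rw [h] at hxin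
    exact absurd hxin (List.not_mem_nil)

-- ===== VERDICT (by name: the statement is the Claim_ definition above) =====
theorem censor_spec : Claim_equal_censor := by
  intro field _
  unfold Spec_censor censor censor_alt
  rw [PySem.Str.len_eq, loopA_eq field.toList 0 (by omega), interB_eq]
  rfl
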